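-- pv_equiv track=rewrite | github.com/Project-PLATEAU/Fluid-dynamics-simulator | src/srcAPI/city_model/bldg_file_for_edit_building.py | get_new_index
-- ===== SOURCE A (Python) =====
-- def get_new_index(old_index, vertice_ids_tobe_removed):
--     # 建物削除前のindexをold_indexとする
--     # 建物削除後のindexをnew_indexとして返却する
--     # 削除対象の頂点はnew_indexをNoneとする
--     i = 0
--     new_index = None
--     if old_index not in vertice_ids_tobe_removed:
--         for id in vertice_ids_tobe_removed:
--             if id < old_index:
--                 i = i + 1
--         new_index = old_index - i
--     return new_index
-- ===== SOURCE B (Python) =====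
-- def get_new_index(old_index, vertice_ids_tobe_removed):
--     # Sort the removed ids, then binary-search old_index's insertion point:
--     # lo = number of removed ids < old_index (duplicates included, as in A),
--     # and s[lo] == old_index exactly when old_index is removed.
--     s = sorted(vertice_ids_tobe_removed)
--     lo, hi = 0, len(s)
--     while lo < hi:
--         mid = (lo + hi) // 2
--         if s[mid] < old_index:
--             lo = mid + 1
--         else:
--             hi = mid
--     if lo < len(s) and s[lo] == old_index:
--         return None
--     return old_index - lo
-- ===== Notes on version B (the rewrite author's own statement) =====
-- stated objective: alternative
-- what changed: Replaces A's linear membership scan plus linear counting loop with sorting the list and a hand-written binary search for the insertion point, which yields both the membership test and the count at once.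
import Mathlib
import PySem

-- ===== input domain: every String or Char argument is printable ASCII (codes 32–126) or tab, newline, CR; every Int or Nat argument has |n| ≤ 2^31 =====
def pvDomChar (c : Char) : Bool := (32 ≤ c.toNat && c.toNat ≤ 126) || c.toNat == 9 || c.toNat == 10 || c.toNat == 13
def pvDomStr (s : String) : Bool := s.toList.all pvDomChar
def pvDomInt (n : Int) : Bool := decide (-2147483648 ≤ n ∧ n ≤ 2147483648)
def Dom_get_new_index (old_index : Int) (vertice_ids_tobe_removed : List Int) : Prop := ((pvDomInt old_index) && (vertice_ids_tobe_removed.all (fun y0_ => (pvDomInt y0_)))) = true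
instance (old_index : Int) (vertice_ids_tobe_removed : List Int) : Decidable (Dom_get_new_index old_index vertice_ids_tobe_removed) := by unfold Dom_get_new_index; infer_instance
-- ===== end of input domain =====

-- B replaces A's linear membership scan + counting loop by sorting the list and binary-searching
-- the insertion point (objective: alternative algorithm, O(n log n) vs A's O(n); not faster).

-- ===== PORT A =====
def get_new_index (old_index : Int) (vertice_ids_tobe_removed : List Int) : Option Int :=
  -- i = 0; new_index = None
  let i : Int := 0
  let new_index : Option Int := none
  if ¬ (old_index ∈ vertice_ids_tobe_removed) then
    let i := vertice_ids_tobe_removed.foldl (fun i id => if id < old_index then i + 1 else i) i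
    some (old_index - i)
  else
    new_index

-- ===== PORT B =====
-- Hand-written binary-search loop of Source B, step for step.  Python's s[mid] is ported as
-- s.getD mid 0: this is exact because every call keeps lo ≤ mid < hi ≤ s.length, so the
-- Python access never raises and the default is never used.
def pvBisect (s : List Int) (x : Int) (lo hi : Nat) : Nat :=
  if h : lo < hi then
    let mid := (lo + hi) / 2
    if s.getD mid 0 < x then pvBisect s x (mid + 1) hi else pvBisect s x lo mid
  else lo
termination_by hi - lo
decreasing_by
  · have h1 : lo ≤ (lo + hi) / 2 := by omega
    omega
  · have h2 : (lo + hi) / 2 < hi := by omega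
    omega

def get_new_index_alt (old_index : Int) (vertice_ids_tobe_removed : List Int) : Option Int :=
  let s := PySem.List.sorted vertice_ids_tobe_removed (fun a => a) false
  let lo := pvBisect s old_index 0 s.length
  if lo < s.length && s.getD lo 0 == old_index then none
  else some (old_index - (lo : Int))

-- ===== PRECONDITION & SPEC =====
def Spec_get_new_index (old_index : Int) (vertice_ids_tobe_removed : List Int) (out : Option Int) : Prop := out = get_new_index_alt old_index vertice_ids_tobe_removed
instance (old_index : Int) (vertice_ids_tobe_removed : List Int) (out : Option Int) : Decidable (Spec_get_new_index old_index vertice_ids_tobe_removed out) := by unfold Spec_get_new_index; infer_instance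

-- ===== CLAIM (what is proved, stated in full; the proofs are below) =====
def Claim_equal_get_new_index : Prop := ∀ (old_index : Int) (vertice_ids_tobe_removed : List Int), Dom_get_new_index old_index vertice_ids_tobe_removed → Spec_get_new_index old_index vertice_ids_tobe_removed (get_new_index old_index vertice_ids_tobe_removed)

-- ===== LEMMAS AND PROOFS =====

-- In a ≤-sorted list, earlier elements are ≤ later ones (via getD inside the length).
theorem pv_sorted_mono (s : List Int) (hs : s.Pairwise (· ≤ ·)) (i j : Nat)
    (hij : i ≤ j) (hj : j < s.length) : s.getD i 0 ≤ s.getD j 0 := by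
  rcases Nat.lt_or_ge i j with h | h
  · have := (List.pairwise_iff_getElem.mp hs) i j (by omega) hj h
    simpa [List.getD_eq_getElem, hj, Nat.lt_of_le_of_lt hij hj] using this
  · have : i = j := by omega
    simp [this]

-- The binary-search invariant: whatever is left of lo is < x, and from hi on it is ≥ x;
-- the result r then separates < x from ≥ x over the whole list.
theorem pv_bisect_inv (s : List Int) (x : Int) (hs : s.Pairwise (· ≤ ·)) :
    ∀ n lo hi, hi - lo ≤ n → lo ≤ hi → hi ≤ s.length →
    (∀ i, i < lo → s.getD i 0 < x) →
    (∀ i, hi ≤ i → i < s.length → x ≤ s.getD i 0) →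
    (∀ i, i < pvBisect s x lo hi → s.getD i 0 < x) ∧
    (∀ i, pvBisect s x lo hi ≤ i → i < s.length → x ≤ s.getD i 0) ∧
    pvBisect s x lo hi ≤ s.length := by
  intro n
  induction n with
  | zero =>
    intro lo hi hn hlh hhl hlow hhigh
    have he : lo = hi := by omega
    rw [pvBisect]
    simp only [he, lt_irrefl, dite_false]
    exact ⟨fun i hi' => hlow i (he ▸ hi'), fun i h1 h2 => hhigh i (by omega) h2, by omega⟩
  | succ n ih =>
    intro lo hi hn hlh hhl hlow hhigh
    rw [pvBisect]
    by_cases h : lo < hi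
    · simp only [h, dite_true]
      have hmid1 : lo ≤ (lo + hi) / 2 := by omega
      have hmid2 : (lo + hi) / 2 < hi := by omega
      by_cases hc : s.getD ((lo + hi) / 2) 0 < x
      · simp only [hc, if_true]
        apply ih ((lo + hi) / 2 + 1) hi (by omega) (by omega) hhl
        · intro i hi'
          exact lt_of_le_of_lt (pv_sorted_mono s hs i ((lo + hi) / 2) (by omega) (by omega)) hc
        · exact hhigh
      · simp only [hc, if_false]
        apply ih lo ((lo + hi) / 2) (by omega) (by omega) (by omega) hlow
        · intro i h1 h2
          exact le_trans (le_of_not_gt hc) (pv_sorted_mono s hs ((lo + hi) / 2) i h1 h2)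
    · simp only [h, dite_false]
      exact ⟨fun i hi' => hlow i hi', fun i h1 h2 => hhigh i (by omega) h2, by omega⟩

-- A's counting loop is countP, shifted by the accumulator.
theorem pv_foldl_count (x : Int) (xs : List Int) (c : Int) :
    xs.foldl (fun i id => if id < x then i + 1 else i) c
      = c + (xs.countP (fun a => a < x) : Int) := by
  induction xs generalizing c with
  | nil => simp
  | cons y ys ih =>
    by_cases h : y < x
    · simp [List.foldl, h, ih]; ring
    · simp [List.foldl, h, ih]

-- If the first r elements satisfy p and the rest do not, countP p = r.
theorem pv_countP_of_split (s : List Int) (p : Int → Bool) (r : Nat) (hr : r ≤ s.length)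
    (h1 : ∀ i, i < r → p (s.getD i 0) = true)
    (h2 : ∀ i, r ≤ i → i < s.length → p (s.getD i 0) = false) :
    s.countP p = r := by
  induction s generalizing r with
  | nil =>
    simp only [List.length_nil, Nat.le_zero] at hr
    simp [hr]
  | cons y ys ih =>
    cases r with
    | zero =>
      simp only [List.countP_cons]
      have hy : p y = false := by simpa using h2 0 (by omega) (by simp)
      have : ys.countP p = 0 := by
        apply ih 0 (by omega) (by omega)
        intro i _ hi
        simpa using h2 (i + 1) (by omega) (by simp; omega)
      simp [this, hy]
    | succ r' =>
      simp only [List.countP_cons]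
      have hy : p y = true := by simpa using h1 0 (by omega)
      have : ys.countP p = r' := by
        apply ih r' (by simpa using hr)
        · intro i hi; simpa using h1 (i + 1) (by omega)
        · intro i hge hlt; simpa using h2 (i + 1) (by omega) (by simp; omega)
      simp [this, hy]

theorem get_new_index_eq (x : Int) (xs : List Int) :
    get_new_index x xs = get_new_index_alt x xs := by
  unfold get_new_index get_new_index_alt
  set s := PySem.List.sorted xs (fun a => a) false with hsdef
  have hperm : s.Perm xs := PySem.List.sorted_perm xs (fun a => a) false
  have hpw : s.Pairwise (· ≤ ·) := by
    simpa using PySem.List.sorted_pairwise xs (fun a => a)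
  set r := pvBisect s x 0 s.length with hrdef
  obtain ⟨h1, h2, hr⟩ :=
    pv_bisect_inv s x hpw s.length 0 s.length (by omega) (by omega) (le_refl _)
      (by omega) (fun i h _ => absurd h (by omega))
  -- the count agrees
  have hcount : xs.countP (fun a => a < x) = r := by
    rw [← hperm.countP_eq]
    exact pv_countP_of_split s _ r hr
      (fun i hi => by simpa using h1 i hi)
      (fun i hge hlt => by simpa using not_lt.mpr (h2 i hge hlt))
  -- membership agrees with the probe s[r] = x
  have hmem : x ∈ xs ↔ (r < s.length ∧ s.getD r 0 = x) := by
    constructor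
    · intro hx
      have hxs : x ∈ s := hperm.mem_iff.mpr hx
      obtain ⟨i, hi, hei⟩ := List.mem_iff_getElem.mp hxs
      have hgd : s.getD i 0 = x := by simp [hi, hei]
      have hri : r ≤ i := by
        by_contra hcon
        exact absurd (hgd ▸ h1 i (by omega)) (lt_irrefl x)
      have hrl : r < s.length := by omega
      have hle : x ≤ s.getD r 0 := h2 r (le_refl r) hrl
      have hge : s.getD r 0 ≤ x := hgd ▸ pv_sorted_mono s hpw r i hri hi
      exact ⟨hrl, le_antisymm hge hle⟩
    · rintro ⟨hrl, hre⟩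
      apply hperm.mem_iff.mp
      have : s.getD r 0 ∈ s := by
        rw [List.getD_eq_getElem s 0 hrl]; exact List.getElem_mem hrl
      exact hre ▸ this
  by_cases hx : x ∈ xs
  · obtain ⟨hrl, hre⟩ := hmem.mp hx
    rw [if_neg (not_not_intro hx), if_pos (by rw [hre]; simp only [beq_self_eq_true, Bool.and_true, decide_eq_true_eq]; exact hrl)]
  · have hcond : ¬ ((r < s.length && s.getD r 0 == x) = true) := by
      intro hcontra
      simp only [Bool.and_eq_true, decide_eq_true_eq, beq_iff_eq] at hcontra
      exact hx (hmem.mpr hcontra)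
    rw [if_pos hx, if_neg hcond, pv_foldl_count]
    simp only [hcount, zero_add]
    rw [← hrdef]

-- ===== VERDICT (by name: the statement is the Claim_ definition above) =====
theorem get_new_index_spec : Claim_equal_get_new_index := by
  intro oi xs _
  unfold Spec_get_new_index
  exact get_new_index_eq oi xs
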